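-- pv_equiv track=rewrite | github.com/aarohi-001/Hackerrank | Practice/Algorithms/Implementation/Breaking the Records/Solution.py | getRecord
-- ===== SOURCE A (Python) =====
-- def getRecord(s):
--     lm=[0,0]
--     smax=s[0]
--     smin=s[0]
--     for i in range(1,len(s)):
--         if(s[i]>smax):
--             smax=s[i]
--             lm[0]=lm[0]+1
--         if(s[i]<smin):
--             smin=s[i]
--             lm[1]=lm[1]+1
--     return(lm)
-- ===== SOURCE B (Python) =====
-- def _scan(first, rest, beats):
--     # running-record scan table: tbl[i] = best of s[0..i] under `beats`
--     cur = first
--     tbl = [cur]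
--     for x in rest:
--         if beats(x, cur):
--             cur = x
--         tbl.append(cur)
--     return tbl
--
-- def _count(tbl, beats):
--     # number of strict record changes between adjacent table entries
--     return sum(1 for a, b in zip(tbl, tbl[1:]) if beats(b, a))
--
-- def getRecord(s):
--     head, rest = s[0], s[1:]
--     gt = lambda a, b: a > b
--     lt = lambda a, b: a < b
--     return [_count(_scan(head, rest, gt), gt),
--             _count(_scan(head, rest, lt), lt)]
-- ===== Notes on version B (the rewrite author's own statement) =====
-- stated objective: alternative
-- what changed: Instead of one index loop updating two record counters in place, B first builds running-maximum and running-minimum scan tables and then counts strict increases/decreases between adjacent table entries via zip.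
import Mathlib
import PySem

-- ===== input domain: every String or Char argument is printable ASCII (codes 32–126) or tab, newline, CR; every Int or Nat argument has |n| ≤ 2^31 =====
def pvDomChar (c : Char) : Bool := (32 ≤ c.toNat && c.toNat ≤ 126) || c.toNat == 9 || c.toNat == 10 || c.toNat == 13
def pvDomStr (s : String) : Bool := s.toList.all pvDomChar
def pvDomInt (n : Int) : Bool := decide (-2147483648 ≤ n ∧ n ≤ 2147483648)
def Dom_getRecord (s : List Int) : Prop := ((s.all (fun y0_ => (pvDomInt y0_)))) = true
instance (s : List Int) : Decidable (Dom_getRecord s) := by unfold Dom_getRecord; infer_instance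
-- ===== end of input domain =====

-- B replaces A's single index loop with two record-scan tables plus an adjacent-pair
-- counting pass (alternative decomposition, same O(n) cost).


-- ===== PORT A =====
-- one loop body iteration of A (state = (lm0, lm1, smax, smin), x = s[i])
def pvStepA (acc : Int × Int × Int × Int) (x : Int) : Int × Int × Int × Int :=
  let acc1 := if x > acc.2.2.1 then (acc.1 + 1, acc.2.1, x, acc.2.2.2) else acc
  if x < acc1.2.2.2 then (acc1.1, acc1.2.1 + 1, acc1.2.2.1, x) else acc1

def getRecord (s : List Int) : List Int :=
  match PySem.List.pyGet? s 0 with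
  | none => []      -- s[0] raises IndexError: excluded by Pre_getRecord
  | some s0 =>
    let st := (PySem.List.pyRange 1 (PySem.List.len s) 1).foldl
      (fun acc i => pvStepA acc (PySem.List.pyGetD s i 0)) (0, 0, s0, s0)
    [st.1, st.2.1]

-- ===== PORT B =====
-- _scan: state = (cur, tbl)
def pvScan (first : Int) (rest : List Int) (beats : Int → Int → Bool) : List Int :=
  (rest.foldl (fun (acc : Int × List Int) x =>
      let cur := if beats x acc.1 then x else acc.1
      (cur, acc.2 ++ [cur])) (first, [first])).2

-- _count: sum over zip(tbl, tbl[1:])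
def pvCount (tbl : List Int) (beats : Int → Int → Bool) : Int :=
  (tbl.zip (PySem.List.slice tbl (some 1) none)).foldl
    (fun c p => if beats p.2 p.1 then c + 1 else c) 0

def getRecord_alt (s : List Int) : List Int :=
  match PySem.List.pyGet? s 0 with
  | none => []      -- s[0] raises IndexError: excluded by Pre_getRecord
  | some head =>
    let rest := PySem.List.slice s (some 1) none
    let gt : Int → Int → Bool := fun a b => decide (a > b)
    let lt : Int → Int → Bool := fun a b => decide (a < b)
    [pvCount (pvScan head rest gt) gt, pvCount (pvScan head rest lt) lt]

-- ===== PRECONDITION & SPEC =====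
-- Pre_ excludes only the empty list, on which A's s[0] raises IndexError.
def Pre_getRecord (s : List Int) : Prop := s ≠ []
instance (s : List Int) : Decidable (Pre_getRecord s) := by unfold Pre_getRecord; infer_instance
def pvWitness_getRecord : List Int := [3, 1, 4]

def Spec_getRecord (s : List Int) (out : List Int) : Prop := out = getRecord_alt s
instance (s : List Int) (out : List Int) : Decidable (Spec_getRecord s out) := by unfold Spec_getRecord; infer_instance

-- ===== CLAIM (what is proved, stated in full; the proofs are below) =====
def Claim_equal_getRecord : Prop := ∀ (s : List Int), Dom_getRecord s → Pre_getRecord s → Spec_getRecord s (getRecord s)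

-- ===== LEMMAS AND PROOFS =====

-- number of strict record changes of `beats` along t starting from record m
def pvCnt (beats : Int → Int → Bool) (m : Int) : List Int → Int
  | [] => 0
  | x :: r => if beats x m then pvCnt beats x r + 1 else pvCnt beats m r

-- running record after consuming t
def pvRun (beats : Int → Int → Bool) (m : Int) (t : List Int) : Int :=
  t.foldl (fun a x => if beats x a then x else a) m

-- the scan table without its first entry
def pvTail (beats : Int → Int → Bool) (cur : Int) : List Int → List Int
  | [] => []
  | x :: r => (if beats x cur then x else cur) :: pvTail beats (if beats x cur then x else cur) r

theorem pvStepA_foldl (t : List Int) : ∀ (c0 c1 m n : Int),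
    t.foldl pvStepA (c0, c1, m, n) =
      (c0 + pvCnt (fun a b => decide (a > b)) m t,
       c1 + pvCnt (fun a b => decide (a < b)) n t,
       pvRun (fun a b => decide (a > b)) m t,
       pvRun (fun a b => decide (a < b)) n t) := by
  induction t with
  | nil => intro c0 c1 m n; simp [pvCnt, pvRun]
  | cons x r ih =>
    intro c0 c1 m n
    by_cases hx : x > m <;> by_cases hn : x < n <;>
      simp [pvStepA, hx, hn, pvCnt, pvRun, ih] <;> omega

theorem pvScan_foldl (beats : Int → Int → Bool) (rest : List Int) :
    ∀ (cur : Int) (tbl : List Int),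
    rest.foldl (fun (acc : Int × List Int) x =>
        let cur := if beats x acc.1 then x else acc.1
        (cur, acc.2 ++ [cur])) (cur, tbl) =
      (pvRun beats cur rest, tbl ++ pvTail beats cur rest) := by
  induction rest with
  | nil => intro cur tbl; simp [pvRun, pvTail]
  | cons x r ih =>
    intro cur tbl
    by_cases h : beats x cur <;> simp [h, pvRun, pvTail, ih]

theorem pvCount_zip (beats : Int → Int → Bool) (hirr : ∀ z, beats z z = false)
    (t : List Int) : ∀ (cur a : Int),
    ((cur :: pvTail beats cur t).zip (pvTail beats cur t)).foldl
      (fun c p => if beats p.2 p.1 then c + 1 else c) a = a + pvCnt beats cur t := by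
  induction t with
  | nil => intro cur a; simp [pvTail, pvCnt]
  | cons x r ih =>
    intro cur a
    by_cases h : beats x cur
    · simp [pvTail, pvCnt, h, ih]
      omega
    · simp [pvTail, pvCnt, h, ih, hirr]

theorem pvScan_eq (first : Int) (rest : List Int) (beats : Int → Int → Bool) :
    pvScan first rest beats = first :: pvTail beats first rest := by
  simp [pvScan, pvScan_foldl]

theorem pvCount_eq (first : Int) (rest : List Int) (beats : Int → Int → Bool)
    (hirr : ∀ z, beats z z = false) :
    pvCount (pvScan first rest beats) beats = pvCnt beats first rest := by
  rw [pvScan_eq]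
  simp only [pvCount, PySem.List.slice_from_one, List.tail_cons]
  simpa using pvCount_zip beats hirr rest first 0

-- ===== VERDICT (by name: the statement is the Claim_ definition above) =====
theorem getRecord_spec : Claim_equal_getRecord := by
  intro s _ hpre
  unfold Spec_getRecord
  match s with
  | [] => exact absurd rfl hpre
  | s0 :: t =>
    show getRecord (s0 :: t) = getRecord_alt (s0 :: t)
    unfold getRecord getRecord_alt
    rw [PySem.List.pyGet?_zero_cons]
    simp only [PySem.List.slice_from_one, List.tail_cons]
    rw [PySem.List.foldl_pyRange_pyGetD (s0 :: t) 0 pvStepA (0, 0, s0, s0) (by norm_num : (0:Int) ≤ 1)]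
    rw [pvStepA_foldl,
      pvCount_eq s0 t (fun a b => decide (a > b)) (fun z => by simp),
      pvCount_eq s0 t (fun a b => decide (a < b)) (fun z => by simp)]
    simp
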